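-- pv_equiv track=rewrite | github.com/zeytnep/Decoder | decode.py | process_decoder_keys
-- ===== SOURCE A (Python) =====
-- def process_decoder_keys(dictionary_data):
--
--     # Determine the number of pairs in the dictionary
--     num_pairs = len(dictionary_data)
--     # Initialize the list of specific counts
--     specific_counts = []
--
--     x = 1
--     y = 2
--     specific_counts.append(x)
--
--     while x < num_pairs:
--         x = x + y
--         specific_counts.append(x)
--         y = y + 1
--         if x+y > num_pairs:
--             break
--     return specific_counts
-- ===== SOURCE B (Python) =====
-- def process_decoder_keys(dictionary_data):
--     n = len(dictionary_data)
--     if n < 2: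
--         return [1]
--     # m = max(2, largest j with j*(j+1)//2 <= n); then emit each triangular number by formula
--     m = 2
--     for j in range(3, n + 1):
--         if j * (j + 1) // 2 <= n:
--             m = j
--     return [k * (k + 1) // 2 for k in range(1, m + 1)]
-- ===== Notes on version B (the rewrite author's own statement) =====
-- stated objective: alternative
-- what changed: B first computes the output length m (largest j>=2 with T_j<=n, floored at 2) and then emits each triangular number independently from the closed formula k*(k+1)//2, instead of threading the running pair (x,y) through a while loop with a break.
import Mathlib
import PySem

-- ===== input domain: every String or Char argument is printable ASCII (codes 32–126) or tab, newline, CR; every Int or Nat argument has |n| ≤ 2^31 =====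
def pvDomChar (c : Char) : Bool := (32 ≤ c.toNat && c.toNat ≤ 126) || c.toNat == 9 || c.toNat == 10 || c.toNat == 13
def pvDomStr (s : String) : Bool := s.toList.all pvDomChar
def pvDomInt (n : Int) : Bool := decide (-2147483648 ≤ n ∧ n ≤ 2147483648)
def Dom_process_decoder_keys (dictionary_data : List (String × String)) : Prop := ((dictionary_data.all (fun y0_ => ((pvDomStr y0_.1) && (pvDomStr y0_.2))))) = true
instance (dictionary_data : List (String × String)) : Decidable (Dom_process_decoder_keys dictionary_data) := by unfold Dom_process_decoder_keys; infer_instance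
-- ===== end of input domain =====

-- B computes the output length first (largest j ≥ 2 with j*(j+1)//2 ≤ n, floored at 2) and emits each
-- triangular number from its closed formula, instead of threading (x, y) through a while loop with a break.

-- ===== PORT A =====
-- the while loop of A; fuel bounds the iteration count (the loop always terminates within num_pairs+1 steps)
def pvLoopA (fuel : Nat) (num_pairs x y : Int) (acc : List Int) : List Int :=
  match fuel with
  | 0 => acc
  | f + 1 =>
    if x < num_pairs then
      let x' := x + y
      let acc' := acc ++ [x']
      let y' := y + 1
      if x' + y' > num_pairs then acc' else pvLoopA f num_pairs x' y' acc'
    else acc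

def process_decoder_keys (dictionary_data : List (String × String)) : List Int :=
  let num_pairs : Int := dictionary_data.length
  pvLoopA (dictionary_data.length + 1) num_pairs 1 2 [1]

-- ===== PORT B =====
def process_decoder_keys_alt (dictionary_data : List (String × String)) : List Int :=
  let n : Int := dictionary_data.length
  if n < 2 then [1]
  else
    let m : Int := (PySem.List.pyRange 3 (n + 1) 1).foldl
      (fun m j => if PySem.Int.floordiv (j * (j + 1)) 2 ≤ n then j else m) 2
    (PySem.List.pyRange 1 (m + 1) 1).map (fun k => PySem.Int.floordiv (k * (k + 1)) 2)

-- ===== PRECONDITION & SPEC =====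
def Spec_process_decoder_keys (dictionary_data : List (String × String)) (out : List Int) : Prop := out = process_decoder_keys_alt dictionary_data
instance (dictionary_data : List (String × String)) (out : List Int) : Decidable (Spec_process_decoder_keys dictionary_data out) := by unfold Spec_process_decoder_keys; infer_instance

-- ===== CLAIM (what is proved, stated in full; the proofs are below) =====
def Claim_equal_process_decoder_keys : Prop := ∀ (dictionary_data : List (String × String)), Dom_process_decoder_keys dictionary_data → Spec_process_decoder_keys dictionary_data (process_decoder_keys dictionary_data)

-- ===== LEMMAS AND PROOFS =====

-- the k-th triangular number, as an Int
def pvT (k : Nat) : Int := ((k * (k + 1)) / 2 : Nat)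

-- the length of the output for n ≥ 2
def pvM (n : Nat) : Nat := max 2 (Nat.findGreatest (fun j => j * (j + 1) / 2 ≤ n) n)

theorem pvTri_succ (k : Nat) : (k + 1) * (k + 1 + 1) / 2 = k * (k + 1) / 2 + (k + 1) := by
  have h1 := Nat.div_mul_cancel ((Nat.even_mul_succ_self k).two_dvd)
  have h2 := Nat.div_mul_cancel ((Nat.even_mul_succ_self (k + 1)).two_dvd)
  have h3 : (k + 1) * (k + 1 + 1) = k * (k + 1) + 2 * (k + 1) := by ring
  omega

theorem pvT_succ (k : Nat) : pvT (k + 1) = pvT k + ((k + 1 : Nat) : Int) := by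
  simp only [pvT, pvTri_succ k]
  push_cast
  ring

theorem pvT_ge (k : Nat) : (k : Int) ≤ pvT k := by
  have h1 := Nat.div_mul_cancel ((Nat.even_mul_succ_self k).two_dvd)
  have h2 : k ≤ k * k := by nlinarith
  have h4 : k * (k + 1) = k * k + k := by ring
  have h3 : k ≤ k * (k + 1) / 2 := by omega
  simp only [pvT]
  exact_mod_cast h3

theorem pvT_mono {k j : Nat} (h : k ≤ j) : pvT k ≤ pvT j := by
  simp only [pvT]
  exact_mod_cast Nat.div_le_div_right (Nat.mul_le_mul h (by omega))

theorem pvT_nat (k : Nat) (n : Nat) : pvT k ≤ (n : Int) ↔ k * (k + 1) / 2 ≤ n := by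
  simp only [pvT]
  exact_mod_cast Iff.rfl

theorem pvM_ge_succ {n k : Nat} (hk : 1 ≤ k) (h : k = 1 ∨ pvT (k + 1) ≤ (n : Int)) :
    k + 1 ≤ pvM n := by
  rcases h with h | h
  · subst h
    have := le_max_left 2 (Nat.findGreatest (fun j => j * (j + 1) / 2 ≤ n) n)
    simp only [pvM]
    omega
  · have hP : (k + 1) * (k + 1 + 1) / 2 ≤ n := (pvT_nat (k + 1) n).mp h
    have hkn : ((k + 1 : Nat) : Int) ≤ (n : Int) := le_trans (pvT_ge (k + 1)) h
    have hkn' : k + 1 ≤ n := by exact_mod_cast hkn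
    have := Nat.le_findGreatest (P := fun j => j * (j + 1) / 2 ≤ n) hkn' hP
    have := le_max_right 2 (Nat.findGreatest (fun j => j * (j + 1) / 2 ≤ n) n)
    simp only [pvM]
    omega

theorem pvM_le_of_gt {n k : Nat} (hk : 1 ≤ k) (hbr : (n : Int) < pvT (k + 2)) :
    pvM n ≤ k + 1 := by
  by_contra hcon
  push_neg at hcon
  unfold pvM at hcon
  have hcon' := lt_max_iff.mp hcon
  have ht : k + 2 ≤ Nat.findGreatest (fun j => j * (j + 1) / 2 ≤ n) n := by omega
  have hPt : Nat.findGreatest (fun j => j * (j + 1) / 2 ≤ n) n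
      * (Nat.findGreatest (fun j => j * (j + 1) / 2 ≤ n) n + 1) / 2 ≤ n :=
    Nat.findGreatest_of_ne_zero (P := fun j => j * (j + 1) / 2 ≤ n) rfl (by omega)
  have hTt := (pvT_nat _ n).mpr hPt
  have := pvT_mono ht
  omega

theorem loop_spec (n : Nat) :
    ∀ (fuel k : Nat) (acc : List Int), 1 ≤ k → pvT k < (n : Int) →
      (k = 1 ∨ pvT (k + 1) ≤ (n : Int)) → pvM n - k ≤ fuel →
      pvLoopA fuel (n : Int) (pvT k) ((k : Int) + 1) acc
        = acc ++ (List.range' (k + 1) (pvM n - k)).map pvT := by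
  intro fuel
  induction fuel with
  | zero =>
    intro k acc hk hlt hinv hfuel
    have hm : k + 1 ≤ pvM n := pvM_ge_succ hk hinv
    exact absurd hfuel (by omega)
  | succ f ih =>
    intro k acc hk hlt hinv hfuel
    have hm : k + 1 ≤ pvM n := pvM_ge_succ hk hinv
    have hx : pvT k + ((k : Int) + 1) = pvT (k + 1) := by
      rw [pvT_succ k]; push_cast; ring
    have hy : pvT (k + 1) + ((k : Int) + 1 + 1) = pvT (k + 2) := by
      rw [pvT_succ (k + 1)]; push_cast; ring
    simp only [pvLoopA, hx, hy]
    by_cases hbr : pvT (k + 2) > (n : Int)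
    · rw [if_pos hlt, if_pos hbr]
      have hle : pvM n ≤ k + 1 := pvM_le_of_gt hk hbr
      have h1 : pvM n - k = 1 := by omega
      rw [h1]
      simp
    · rw [if_pos hlt, if_neg hbr]
      push_neg at hbr
      have hlt' : pvT (k + 1) < (n : Int) := by
        have := pvT_succ (k + 1)
        have hpos : (0 : Int) < ((k + 1 + 1 : Nat) : Int) := by positivity
        omega
      have hcast : (k : Int) + 1 + 1 = ((k + 1 : Nat) : Int) + 1 := by push_cast; ring
      rw [hcast, ih (k + 1) (acc ++ [pvT (k + 1)]) (by omega) hlt' (Or.inr hbr) (by omega)]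
      have hsplit : pvM n - k = (pvM n - (k + 1)) + 1 := by omega
      rw [hsplit, List.range'_succ]
      simp

theorem fold_spec (n : Nat) : ∀ (b : Nat), 2 ≤ b →
    (PySem.List.pyRange 3 ((b : Int) + 1) 1).foldl
      (fun m j => if PySem.Int.floordiv (j * (j + 1)) 2 ≤ (n : Int) then j else m) 2
      = ((max 2 (Nat.findGreatest (fun j => j * (j + 1) / 2 ≤ n) b) : Nat) : Int) := by
  intro b hb
  induction b, hb using Nat.le_induction with
  | base =>
    rw [PySem.List.pyRange_one_eq_nil (by norm_num)]
    have := Nat.findGreatest_le (P := fun j => j * (j + 1) / 2 ≤ n) 2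
    simp only [List.foldl_nil]
    omega
  | succ b hb ihb =>
    have hsr : PySem.List.pyRange 3 (((b + 1 : Nat) : Int) + 1) 1
        = PySem.List.pyRange 3 ((b : Int) + 1) 1 ++ [(b : Int) + 1] := by
      have h := PySem.List.pyRange_one_succ_right (a := 3) (b := (b : Int) + 1)
        (by exact_mod_cast (by omega : (3 : Int) ≤ (b : Int) + 1))
      rw [← h]
      push_cast
      ring_nf
    rw [hsr, List.foldl_append, ihb]
    simp only [List.foldl_cons, List.foldl_nil]
    have hcond : (PySem.Int.floordiv (((b : Int) + 1) * ((b : Int) + 1 + 1)) 2 ≤ (n : Int))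
        ↔ ((b + 1) * (b + 1 + 1) / 2 ≤ n) := by
      rw [show ((b : Int) + 1) * ((b : Int) + 1 + 1) = (((b + 1) * (b + 1 + 1) : Nat) : Int) by
        push_cast; ring]
      rw [show (2 : Int) = ((2 : Nat) : Int) by norm_num]
      rw [PySem.Int.floordiv_natCast]
      exact_mod_cast Iff.rfl
    rw [Nat.findGreatest_succ]
    by_cases hc : (b + 1) * (b + 1 + 1) / 2 ≤ n
    · rw [if_pos (hcond.mpr hc), if_pos hc]
      omega
    · rw [if_neg (fun h => hc (hcond.mp h)), if_neg hc]

theorem map_spec (m : Nat) :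
    (PySem.List.pyRange 1 ((m : Int) + 1) 1).map
        (fun k => PySem.Int.floordiv (k * (k + 1)) 2)
      = (List.range' 1 m).map pvT := by
  rw [PySem.List.pyRange_one, List.range'_eq_map_range, List.map_map, List.map_map]
  rw [show ((m : Int) + 1 - 1).toNat = m by omega]
  apply List.map_congr_left
  intro k _
  simp only [Function.comp]
  rw [show (1 : Int) + (k : Int) = (((1 + k : Nat)) : Int) by push_cast; ring]
  rw [show ((1 + k : Nat) : Int) * (((1 + k : Nat) : Int) + 1)
      = (((1 + k) * (1 + k + 1) : Nat) : Int) by push_cast; ring]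
  rw [show (2 : Int) = ((2 : Nat) : Int) by norm_num]
  rw [PySem.Int.floordiv_natCast]
  simp [pvT]

theorem key (n : Nat) :
    pvLoopA (n + 1) (n : Int) 1 2 [1]
      = (if (n : Int) < 2 then [1]
         else
           let m : Int := (PySem.List.pyRange 3 ((n : Int) + 1) 1).foldl
             (fun m j => if PySem.Int.floordiv (j * (j + 1)) 2 ≤ (n : Int) then j else m) 2
           (PySem.List.pyRange 1 (m + 1) 1).map (fun k => PySem.Int.floordiv (k * (k + 1)) 2)) := by
  by_cases hn : (n : Int) < 2
  · rw [if_pos hn]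
    have hn' : n = 0 ∨ n = 1 := by omega
    rcases hn' with h | h <;> subst h <;> rfl
  · rw [if_neg hn]
    push_neg at hn
    have hn2 : 2 ≤ n := by exact_mod_cast hn
    simp only
    rw [fold_spec n n hn2]
    rw [show (max 2 (Nat.findGreatest (fun j => j * (j + 1) / 2 ≤ n) n)) = pvM n from rfl]
    rw [map_spec (pvM n)]
    have hM2 : 2 ≤ pvM n := le_max_left _ _
    have hfuel : pvM n - 1 ≤ n + 1 := by
      have := Nat.findGreatest_le (P := fun j => j * (j + 1) / 2 ≤ n) n
      simp only [pvM]
      omega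
    have h := loop_spec n (n + 1) 1 [1] (le_refl 1) (by
        rw [show pvT 1 = (1 : Int) from rfl]; omega) (Or.inl rfl) hfuel
    rw [show pvT 1 = (1 : Int) from rfl] at h
    rw [show ((1 : Nat) : Int) + 1 = 2 by norm_num] at h
    rw [h]
    rw [show pvM n = (pvM n - 1) + 1 by omega, List.range'_succ]
    simp [show pvT 1 = (1 : Int) from rfl]

-- ===== VERDICT (by name: the statement is the Claim_ definition above) =====
theorem process_decoder_keys_spec : Claim_equal_process_decoder_keys := by
  intro d _
  unfold Spec_process_decoder_keys process_decoder_keys process_decoder_keys_alt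
  exact key d.length
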